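-- pv_equiv track=rewrite | github.com/ismailmosleh/cp-problems | cpit/J.py | solve
-- ===== SOURCE A (Python) =====
-- def solve(a,c) :
--     day = 0
--     rm = c
--     e = a
--     while(rm > 0) :
--         day += 1
--         rm = min(rm+e,c) - day
--
--     return day
-- ===== SOURCE B (Python) =====
-- def solve(a, c):
--     # O(log c): remaining after day d has a closed form (saturated phase of
--     # min(d, m) days with m = a+1 for a >= 0, then quadratic decay); it is
--     # strictly decreasing, so binary-search the first day it reaches <= 0.
--     if c <= 0:
--         return 0
--     m = a + 1 if a >= 0 else 0
--
--     def rem(d):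
--         t = min(d, m)
--         return c - t + (d - t) * a - (d * (d + 1) // 2 - t * (t + 1) // 2)
--
--     lo, hi = 0, c
--     while hi - lo > 1:
--         mid = (lo + hi) // 2
--         if rem(mid) > 0:
--             lo = mid
--         else:
--             hi = mid
--     return hi
-- ===== Notes on version B (the rewrite author's own statement) =====
-- stated objective: faster
-- what changed: B replaces A's day-by-day simulation with a closed-form expression for the remaining amount after d days (saturated phase of min(d, a+1) days, then quadratic decay) and binary-searches the first day it drops to <= 0.
import Mathlib
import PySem

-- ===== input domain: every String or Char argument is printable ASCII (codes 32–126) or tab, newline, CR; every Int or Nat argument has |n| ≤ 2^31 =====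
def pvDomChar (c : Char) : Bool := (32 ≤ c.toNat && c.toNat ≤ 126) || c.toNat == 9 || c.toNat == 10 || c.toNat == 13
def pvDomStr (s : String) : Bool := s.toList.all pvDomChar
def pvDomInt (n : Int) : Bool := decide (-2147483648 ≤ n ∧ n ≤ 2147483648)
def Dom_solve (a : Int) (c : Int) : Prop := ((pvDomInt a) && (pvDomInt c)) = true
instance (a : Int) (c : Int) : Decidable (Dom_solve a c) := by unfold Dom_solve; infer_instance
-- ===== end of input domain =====

-- B replaces A's O(c) day-by-day simulation by a closed form for the remaining
-- amount after d days plus an O(log c) binary search for the first day it is ≤ 0.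

-- ===== PORT A =====
-- A's while loop; the Nat fuel is only a totality guard (the loop runs at most
-- c days, and fuel c.toNat + 1 is proved sufficient below).
def solveLoop (a c : Int) : Nat → Int → Int → Int
  | 0, day, _ => day
  | fuel + 1, day, rm =>
    if rm > 0 then solveLoop a c fuel (day + 1) (min (rm + a) c - (day + 1))
    else day

def solve (a : Int) (c : Int) : Int := solveLoop a c (c.toNat + 1) 0 c

-- ===== PORT B =====
-- m = a + 1 if a >= 0 else 0
def remM (a : Int) : Int := if a ≥ 0 then a + 1 else 0

-- x * (x + 1) // 2  (Python //; the product is even here so it is exact division)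
def triB (x : Int) : Int := PySem.Int.floordiv (x * (x + 1)) 2

-- rem(d) from Source B: remaining amount after day d
def remB (a c d : Int) : Int :=
  let t : Int := min d (remM a)
  c - t + (d - t) * a - (triB d - triB t)

-- midpoint bounds, used by bsearch's termination proof
theorem pvMidBounds (lo hi : Int) (h : 1 < hi - lo) :
    lo < PySem.Int.floordiv (lo + hi) 2 ∧ PySem.Int.floordiv (lo + hi) 2 < hi := by
  have h1 := PySem.Int.floordiv_mul_add_mod (lo + hi) 2
  have h2 := PySem.Int.mod_nonneg (lo + hi) (show (0:Int) < 2 by norm_num)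
  have h3 := PySem.Int.mod_lt (lo + hi) (show (0:Int) < 2 by norm_num)
  omega

-- the while loop of Source B's binary search
def bsearch (a c lo hi : Int) : Int :=
  if _h : hi - lo > 1 then
    let mid := PySem.Int.floordiv (lo + hi) 2
    if remB a c mid > 0 then bsearch a c mid hi else bsearch a c lo mid
  else hi
termination_by (hi - lo).toNat
decreasing_by
  · have := pvMidBounds lo hi (by omega)
    omega
  · have := pvMidBounds lo hi (by omega)
    omega

def solve_alt (a : Int) (c : Int) : Int :=
  if c ≤ 0 then 0 else bsearch a c 0 c

-- ===== PRECONDITION & SPEC =====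
def Spec_solve (a : Int) (c : Int) (out : Int) : Prop := out = solve_alt a c
instance (a : Int) (c : Int) (out : Int) : Decidable (Spec_solve a c out) := by unfold Spec_solve; infer_instance

-- ===== CLAIM (what is proved, stated in full; the proofs are below) =====
def Claim_equal_solve : Prop := ∀ (a : Int) (c : Int), Dom_solve a c → Spec_solve a c (solve a c)

-- ===== LEMMAS AND PROOFS =====

-- triB is exact halving: 2 * triB x = x * (x + 1)
theorem triB_spec (x : Int) : 2 * triB x = x * (x + 1) := by
  obtain ⟨k, hk⟩ := Int.even_mul_succ_self x
  have hk2 : x * (x + 1) = 2 * k := by omega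
  unfold triB
  rw [hk2, PySem.Int.floordiv_eq_ediv_of_pos (by norm_num),
      Int.mul_ediv_cancel_left k (by norm_num)]

theorem triB_succ (x : Int) : triB (x + 1) = triB x + (x + 1) := by
  have h1 := triB_spec x
  have h2 := triB_spec (x + 1)
  nlinarith [h1, h2]

theorem remM_nonneg (a : Int) : 0 ≤ remM a := by
  unfold remM; split <;> omega

theorem remM_gt (a : Int) : a < remM a := by
  unfold remM; split <;> omega

-- triangle-number gap bound: for 0 ≤ m ≤ d, triB d - triB m ≥ (d - m) * (m + 1)
theorem triB_gap (m : Int) (hm : 0 ≤ m) :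
    ∀ d : Int, m ≤ d → (d - m) * (m + 1) ≤ triB d - triB m := by
  intro d hd
  induction d, hd using Int.le_induction with
  | base => simp
  | succ n hn ih =>
    rw [triB_succ]
    nlinarith [ih]

-- rem(0) = c
theorem remB_zero (a c : Int) : remB a c 0 = c := by
  have hm := remM_nonneg a
  have ht : min (0:Int) (remM a) = 0 := by omega
  simp [remB, ht]

-- rem(d) ≤ c - d for d ≥ 0
theorem remB_le (a c : Int) (d : Int) (hd : 0 ≤ d) : remB a c d ≤ c - d := by
  have hm := remM_nonneg a
  have ha := remM_gt a
  unfold remB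
  by_cases h : d ≤ remM a
  · have ht : min d (remM a) = d := by omega
    simp [ht]
  · have ht : min d (remM a) = remM a := by omega
    have hgap := triB_gap (remM a) hm d (by omega)
    simp only [ht]
    nlinarith [hgap]

-- rem satisfies exactly A's update rule
theorem remM_cases (a : Int) : (0 ≤ a ∧ remM a = a + 1) ∨ (a < 0 ∧ remM a = 0) := by
  unfold remM; split <;> omega

theorem remB_rec (a c : Int) (d : Int) (hd : 0 ≤ d) :
    remB a c (d + 1) = min (remB a c d + a) c - (d + 1) := by
  have hm := remM_cases a
  by_cases h : d + 1 ≤ remM a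
  · -- saturated day: rem d = c - d, rem (d+1) = c - (d+1), the min picks c
    have htd : min d (remM a) = d := by omega
    have htd1 : min (d + 1) (remM a) = d + 1 := by omega
    have h1 : remB a c d = c - d := by simp [remB, htd]
    have h2 : remB a c (d + 1) = c - (d + 1) := by simp [remB, htd1]
    have hmin : min (c - d + a) c = c := by omega
    rw [h1, h2, hmin]
  · -- unsaturated day: both t's equal m, the min picks rem d + a
    have htd : min d (remM a) = remM a := by omega
    have htd1 : min (d + 1) (remM a) = remM a := by omega
    have hstep : remB a c (d + 1) = remB a c d + a - (d + 1) := by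
      simp only [remB, htd, htd1, triB_succ d]
      ring
    have hle : remB a c d + a ≤ c := by
      have := remB_le a c d hd
      omega
    have hmin : min (remB a c d + a) c = remB a c d + a := by omega
    rw [hstep, hmin]

-- rem strictly decreases
theorem remB_dec (a c : Int) (d : Int) (hd : 0 ≤ d) :
    remB a c (d + 1) ≤ remB a c d - 1 := by
  have hm := remM_nonneg a
  have ha := remM_gt a
  by_cases h : d + 1 ≤ remM a
  · have htd : min d (remM a) = d := by omega
    have htd1 : min (d + 1) (remM a) = d + 1 := by omega
    simp [remB, htd, htd1]
  · have htd : min d (remM a) = remM a := by omega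
    have htd1 : min (d + 1) (remM a) = remM a := by omega
    have hstep : remB a c (d + 1) = remB a c d + a - (d + 1) := by
      simp only [remB, htd, htd1, triB_succ d]
      ring
    omega

theorem remB_anti (a c : Int) (d : Int) (hd : 0 ≤ d) :
    ∀ e : Int, d ≤ e → remB a c e ≤ remB a c d - (e - d) := by
  intro e he
  induction e, he using Int.le_induction with
  | base => simp
  | succ n hn ih =>
    have := remB_dec a c n (by omega)
    omega

-- the stopping-day characterisation both programs satisfy
def QStop (a c N : Int) : Prop := 1 ≤ N ∧ remB a c N ≤ 0 ∧ 0 < remB a c (N - 1)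

theorem QStop_uniq (a c N N' : Int) (h : QStop a c N) (h' : QStop a c N') : N = N' := by
  obtain ⟨h1, h2, h3⟩ := h
  obtain ⟨h1', h2', h3'⟩ := h'
  rcases lt_trichotomy N N' with hlt | heq | hgt
  · have := remB_anti a c N (by omega) (N' - 1) (by omega)
    omega
  · exact heq
  · have := remB_anti a c N' (by omega) (N - 1) (by omega)
    omega

theorem solveLoop_stop (a c : Int) (f : Nat) (d rm : Int) (h : ¬ rm > 0) :
    solveLoop a c f d rm = d := by
  cases f <;> simp [solveLoop, h]

theorem solveLoop_spec (a c : Int) :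
    ∀ (f : Nat) (d : Int), 0 ≤ d → 0 < remB a c d → c ≤ d + f →
      QStop a c (solveLoop a c f d (remB a c d)) := by
  intro f
  induction f with
  | zero =>
    intro d hd hpos hf
    have := remB_le a c d hd
    omega
  | succ n ih =>
    intro d hd hpos hf
    have hrec := remB_rec a c d hd
    have hstep : solveLoop a c (n + 1) d (remB a c d)
        = solveLoop a c n (d + 1) (remB a c (d + 1)) := by
      simp [solveLoop, hpos, hrec]
    rw [hstep]
    by_cases hnext : 0 < remB a c (d + 1)
    · have hc : d + 1 < c := by
        have := remB_le a c (d + 1) (by omega)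
        omega
      exact ih (d + 1) (by omega) hnext (by omega)
    · rw [solveLoop_stop a c n (d + 1) _ hnext]
      refine ⟨by omega, by omega, by simpa using hpos⟩

theorem bsearch_spec (a c : Int) :
    ∀ (μ : Nat) (lo hi : Int), (hi - lo).toNat ≤ μ → 0 ≤ lo → lo + 1 ≤ hi →
      0 < remB a c lo → remB a c hi ≤ 0 → QStop a c (bsearch a c lo hi) := by
  intro μ
  induction μ with
  | zero =>
    intro lo hi hμ hlo hlt _ _
    omega
  | succ n ih =>
    intro lo hi hμ hlo hlt hplo hphi
    rw [bsearch]
    by_cases h : hi - lo > 1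
    · have hmid := pvMidBounds lo hi (by omega)
      rw [dif_pos h]
      by_cases hr : remB a c (PySem.Int.floordiv (lo + hi) 2) > 0
      · simp only [hr, if_true]
        exact ih _ hi (by omega) (by omega) (by omega) hr hphi
      · simp only [hr, if_false]
        exact ih lo _ (by omega) hlo (by omega) hplo (by omega)
    · rw [dif_neg h]
      have hhi : hi = lo + 1 := by omega
      refine ⟨by omega, hphi, ?_⟩
      have : hi - 1 = lo := by omega
      rw [this]
      exact hplo

-- ===== VERDICT (by name: the statement is the Claim_ definition above) =====
theorem solve_spec : Claim_equal_solve := by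
  intro a c _
  unfold Spec_solve solve solve_alt
  by_cases hc : c ≤ 0
  · rw [solveLoop_stop a c _ 0 c (by omega), if_pos hc]
  · rw [if_neg (by omega)]
    have hA : QStop a c (solveLoop a c (c.toNat + 1) 0 c) := by
      have h0 := remB_zero a c
      have := solveLoop_spec a c (c.toNat + 1) 0 (by omega) (by omega)
        (by omega)
      rwa [h0] at this
    have hB : QStop a c (bsearch a c 0 c) := by
      refine bsearch_spec a c (c - 0).toNat 0 c (by omega) (by omega) (by omega) ?_ ?_
      · rw [remB_zero]; omega
      · have := remB_le a c c (by omega)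
        omega
    exact QStop_uniq a c _ _ hA hB
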